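-- pv_equiv track=rewrite | github.com/salog0d/DSA_TEC2 | greedy/coin_collecting_greedy.py | build_suffix_max
-- ===== SOURCE A (Python) =====
-- from typing import List, Tuple
--
-- def build_suffix_max(grid: List[List[int]]) -> List[List[int]]:
--     n, m = len(grid), len(grid[0])
--     sfx = [[0]*m for _ in range(n)]
--     for i in range(n-1, -1, -1):
--         for j in range(m-1, -1, -1):
--             best = grid[i][j]
--             if i+1 < n: best = max(best, sfx[i+1][j])
--             if j+1 < m: best = max(best, sfx[i][j+1])
--             if i+1 < n and j+1 < m: best = max(best, sfx[i+1][j+1])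
--             sfx[i][j] = best
--     return sfx
-- ===== SOURCE B (Python) =====
-- def build_suffix_max(grid):
--     m = len(grid[0])
--     out = []
--     prev = None
--     for row in reversed(grid):
--         # suffix maxima of this row (first m entries), built back-to-front
--         r = []
--         for x in reversed(row[:m]):
--             r.append(max(x, r[-1]) if r else x)
--         r.reverse()
--         # merge with the row-suffix maxima accumulated below
--         if prev is not None:
--             r = [max(a, b) for a, b in zip(r, prev)]
--         out.append(r)
--         prev = r
--     out.reverse()
--     return out
-- ===== Notes on version B (the rewrite author's own statement) =====
-- stated objective: faster
-- what changed: Replaces A's preallocated n*m matrix DP with three conditional maxes per indexed cell (backward double loop with in-place writes) by a two-stage sweep: per-row suffix maxima built back-to-front, then a bottom-up pointwise zip-max with the carried previous result row.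
import Mathlib
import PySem

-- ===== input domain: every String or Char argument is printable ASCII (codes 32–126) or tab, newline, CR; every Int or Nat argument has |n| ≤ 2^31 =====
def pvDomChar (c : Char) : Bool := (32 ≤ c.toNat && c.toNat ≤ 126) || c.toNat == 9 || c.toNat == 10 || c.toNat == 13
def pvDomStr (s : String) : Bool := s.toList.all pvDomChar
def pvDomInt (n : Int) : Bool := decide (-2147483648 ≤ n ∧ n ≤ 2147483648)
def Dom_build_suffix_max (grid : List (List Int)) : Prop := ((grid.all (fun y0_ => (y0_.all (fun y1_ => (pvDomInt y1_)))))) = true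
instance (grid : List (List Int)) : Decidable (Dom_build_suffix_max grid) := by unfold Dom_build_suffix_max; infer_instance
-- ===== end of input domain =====

-- B replaces A's in-place n×m matrix DP (three conditional maxes per cell) by a per-row
-- suffix-max pass followed by a bottom-up pointwise zip-max with the carried row below.

-- ===== PORT A =====
def build_suffix_max (grid : List (List Int)) : List (List Int) :=
  let n : Int := grid.length
  let m : Int := (PySem.List.pyGetD grid 0 []).length
  let sfx : List (List Int) :=
    List.replicate grid.length (List.replicate (PySem.List.pyGetD grid 0 []).length (0 : Int))
  (PySem.List.pyRange (n - 1) (-1) (-1)).foldl (fun sfx i =>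
    (PySem.List.pyRange (m - 1) (-1) (-1)).foldl (fun sfx j =>
      let best := PySem.List.pyGetD (PySem.List.pyGetD grid i []) j 0
      let best := if i + 1 < n then
          max best (PySem.List.pyGetD (PySem.List.pyGetD sfx (i + 1) []) j 0) else best
      let best := if j + 1 < m then
          max best (PySem.List.pyGetD (PySem.List.pyGetD sfx i []) (j + 1) 0) else best
      let best := if i + 1 < n ∧ j + 1 < m then
          max best (PySem.List.pyGetD (PySem.List.pyGetD sfx (i + 1) []) (j + 1) 0) else best
      PySem.List.pySetD sfx i (PySem.List.pySetD (PySem.List.pyGetD sfx i []) j best)) sfx) sfx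

-- ===== PORT B =====
def build_suffix_max_alt (grid : List (List Int)) : List (List Int) :=
  let m : Int := (PySem.List.pyGetD grid 0 []).length
  let res :=
    grid.reverse.foldl (fun (acc : List (List Int) × Option (List Int)) row =>
      -- suffix maxima of row[:m], built back-to-front then reversed
      let r := ((PySem.List.slice row none (some m)).reverse.foldl
          (fun (r : List Int) x =>
            r ++ [if r ≠ [] then max x (PySem.List.pyGetD r (-1) 0) else x]) []).reverse
      -- merge with the accumulated row below, if any
      let r := match acc.2 with
        | none => r
        | some p => List.zipWith max r p
      (acc.1 ++ [r], some r)) ([], none)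
  res.1.reverse

-- ===== PRECONDITION & SPEC =====
-- Pre_ excludes exactly the inputs on which A raises IndexError: the empty grid
-- (grid[0]) and grids where some row is shorter than the first row (grid[i][j]).
def Pre_build_suffix_max (grid : List (List Int)) : Prop :=
  grid ≠ [] ∧ ∀ row ∈ grid, (grid.headD []).length ≤ row.length
instance (grid : List (List Int)) : Decidable (Pre_build_suffix_max grid) := by
  unfold Pre_build_suffix_max; infer_instance
def pvWitness_build_suffix_max : List (List Int) := [[1, 2], [3, 0]]
def Spec_build_suffix_max (grid : List (List Int)) (out : List (List Int)) : Prop :=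
  out = build_suffix_max_alt grid
instance (grid : List (List Int)) (out : List (List Int)) :
    Decidable (Spec_build_suffix_max grid out) := by unfold Spec_build_suffix_max; infer_instance

-- ===== CLAIM =====
def Claim_equal_build_suffix_max : Prop :=
  ∀ (grid : List (List Int)), Dom_build_suffix_max grid → Pre_build_suffix_max grid →
    Spec_build_suffix_max grid (build_suffix_max grid)

-- ===== LEMMAS AND PROOFS =====

-- row suffix maxima (spec-side recursion)
def rsuf : List Int → List Int
  | [] => []
  | x :: xs => match rsuf xs with
    | [] => [x]
    | b :: t => max x b :: b :: t

-- bottom-up merge of rows (spec-side recursion)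
def bDown : List (List Int) → List (List Int)
  | [] => []
  | r :: rest =>
    let d := bDown rest
    (match d with | [] => r | p :: _ => List.zipWith max r p) :: d

-- the row that A's inner loop writes at a row with grid row g and rows-below result D
def tRow (m : Nat) (g : List Int) (D : List (List Int)) : List Int :=
  match D with
  | [] => rsuf (g.take m)
  | s :: _ => List.zipWith max (rsuf (g.take m)) s

-- A's inner-loop body, named for the proofs (identical to the lambda in the port)
def innerStep (grid : List (List Int)) (i : Int) (sfx : List (List Int)) (j : Int) :
    List (List Int) :=
  let n : Int := grid.length
  let m : Int := (PySem.List.pyGetD grid 0 []).length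
  let best := PySem.List.pyGetD (PySem.List.pyGetD grid i []) j 0
  let best := if i + 1 < n then
      max best (PySem.List.pyGetD (PySem.List.pyGetD sfx (i + 1) []) j 0) else best
  let best := if j + 1 < m then
      max best (PySem.List.pyGetD (PySem.List.pyGetD sfx i []) (j + 1) 0) else best
  let best := if i + 1 < n ∧ j + 1 < m then
      max best (PySem.List.pyGetD (PySem.List.pyGetD sfx (i + 1) []) (j + 1) 0) else best
  PySem.List.pySetD sfx i (PySem.List.pySetD (PySem.List.pyGetD sfx i []) j best)

def outerStep (grid : List (List Int)) (sfx : List (List Int)) (i : Int) : List (List Int) :=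
  (PySem.List.pyRange ((PySem.List.pyGetD grid 0 []).length - 1) (-1) (-1)).foldl
    (innerStep grid i) sfx

def Antit (s : List Int) : Prop := ∀ j : Nat, j + 1 < s.length → s.getD (j+1) 0 ≤ s.getD j 0

lemma length_rsuf (l : List Int) : (rsuf l).length = l.length := by
  induction l with
  | nil => rfl
  | cons x xs ih =>
    cases h : rsuf xs with
    | nil =>
      rw [h] at ih; simp at ih
      have hx : xs = [] := List.eq_nil_of_length_eq_zero ih.symm
      subst hx; simp [rsuf]
    | cons b t => rw [h] at ih; simp at ih; simp [rsuf, h]; omega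

lemma rsuf_getD (l : List Int) (j : Nat) (h : j + 1 < l.length) :
    (rsuf l).getD j 0 = max (l.getD j 0) ((rsuf l).getD (j+1) 0) := by
  induction l generalizing j with
  | nil => simp at h
  | cons x xs ih =>
    have hlen := length_rsuf xs
    cases hx : rsuf xs with
    | nil =>
      rw [hx] at hlen; simp at hlen
      simp at h; omega
    | cons b t =>
      simp only [rsuf, hx]
      cases j with
      | zero =>
        simp
      | succ j' =>
        simp only [List.getD_cons_succ]
        have h' : j' + 1 < xs.length := by simp at h; omega
        have := ih j' h'
        rw [hx] at this
        exact this

lemma rsuf_getD_last (l : List Int) (j : Nat) (h : l.length = j + 1) :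
    (rsuf l).getD j 0 = l.getD j 0 := by
  induction l generalizing j with
  | nil => simp at h
  | cons x xs ih =>
    have hlen := length_rsuf xs
    cases hx : rsuf xs with
    | nil =>
      rw [hx] at hlen; simp at hlen
      simp at h
      have : j = 0 := by omega
      subst this
      simp [rsuf, hx]
    | cons b t =>
      rw [hx] at hlen
      simp only [rsuf, hx]
      cases j with
      | zero =>
        have hx0 : xs = [] := by simpa using h
        subst hx0
        simp at hlen
      | succ j' =>
        simp only [List.getD_cons_succ]
        have h' : xs.length = j' + 1 := by simp at h; omega
        have := ih j' h'
        rw [hx] at this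
        exact this

lemma antit_rsuf (l : List Int) : Antit (rsuf l) := by
  intro j hj
  rw [length_rsuf] at hj
  rw [rsuf_getD l j hj]
  exact le_max_right _ _

lemma getD_zipWith_max (a b : List Int) (j : Nat) (ha : j < a.length) (hb : j < b.length) :
    (List.zipWith max a b).getD j 0 = max (a.getD j 0) (b.getD j 0) := by
  have hz : j < (List.zipWith max a b).length := by simp; omega
  rw [List.getD_eq_getElem _ _ hz, List.getD_eq_getElem _ _ ha, List.getD_eq_getElem _ _ hb]
  exact List.getElem_zipWith

lemma antit_zipWith (a b : List Int) (ha : Antit a) (hb : Antit b)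
    (h : a.length = b.length) : Antit (List.zipWith max a b) := by
  intro j hj
  simp only [List.length_zipWith] at hj
  have h1 : j + 1 < a.length := by omega
  have h2 : j + 1 < b.length := by omega
  rw [getD_zipWith_max a b j (by omega) (by omega), getD_zipWith_max a b (j+1) h1 h2]
  exact max_le_max (ha j h1) (hb j (by omega))

lemma length_bDown (R : List (List Int)) : (bDown R).length = R.length := by
  induction R with
  | nil => rfl
  | cons r rest ih => simp [bDown, ih]

lemma bDown_rows (R : List (List Int)) (m : Nat)
    (h : ∀ r ∈ R, r.length = m ∧ Antit r) :
    ∀ r ∈ bDown R, r.length = m ∧ Antit r := by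
  induction R with
  | nil => intro r hr; simp [bDown] at hr
  | cons r0 rest ih =>
    have hrest := ih (fun r hr => h r (List.mem_cons_of_mem _ hr))
    have h0 := h r0 List.mem_cons_self
    intro r hr
    simp only [bDown] at hr
    rcases List.mem_cons.1 hr with hhd | htl
    · subst hhd
      cases hd : bDown rest with
      | nil => exact h0
      | cons p ps =>
        have hp := hrest p (by rw [hd]; exact List.mem_cons_self)
        show (List.zipWith max r0 p).length = m ∧ Antit (List.zipWith max r0 p)
        constructor
        · simp [h0.1, hp.1]
        · exact antit_zipWith _ _ h0.2 hp.2 (by rw [h0.1, hp.1])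
    · exact hrest r htl

lemma length_tRow (m : Nat) (g : List Int) (D : List (List Int)) (hg : m ≤ g.length)
    (hD : ∀ s ∈ D, s.length = m) : (tRow m g D).length = m := by
  cases D with
  | nil => simp [tRow, length_rsuf, hg]
  | cons s ds =>
    have hs := hD s List.mem_cons_self
    simp [tRow, length_rsuf, hg, hs]

-- == B-side bridging ==

lemma b_row_fold (l acc : List Int) :
    l.foldl (fun (r : List Int) x =>
        r ++ [if r ≠ [] then max x (PySem.List.pyGetD r (-1) 0) else x]) acc
      = (l.foldl (fun (r : List Int) x =>
          (match r with | [] => x | b :: _ => max x b) :: r) acc.reverse).reverse := by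
  induction l generalizing acc with
  | nil => simp
  | cons x l ih =>
    simp only [List.foldl_cons]
    rw [ih]
    congr 1
    cases hrev : acc.reverse with
    | nil =>
      have : acc = [] := by simpa using congrArg List.reverse hrev
      subst this; simp
    | cons b t =>
      have hacc : acc = t.reverse ++ [b] := by
        have := congrArg List.reverse hrev
        simpa using this
      subst hacc
      simp [PySem.List.pyGetD_neg_one_append_singleton]

lemma b_row_rsuf (l : List Int) :
    l.foldr (fun x (r : List Int) =>
        (match r with | [] => x | b :: _ => max x b) :: r) [] = rsuf l := by
  induction l with
  | nil => rfl
  | cons x xs ih =>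
    simp only [List.foldr_cons, ih]
    cases h : rsuf xs with
    | nil => simp [rsuf, h]
    | cons b t => simp [rsuf, h]

lemma b_outer (f : List Int → List Int) (rows : List (List Int)) :
    rows.reverse.foldl (fun (acc : List (List Int) × Option (List Int)) row =>
        let r := f row
        let r := match acc.2 with
          | none => r
          | some p => List.zipWith max r p
        (acc.1 ++ [r], some r)) ([], none)
      = ((bDown (rows.map f)).reverse, (bDown (rows.map f)).head?) := by
  induction rows with
  | nil => simp [bDown]
  | cons r rest ih =>
    simp only [List.reverse_cons, List.foldl_append, ih, List.foldl_cons, List.foldl_nil,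
      List.map_cons]
    cases hd : bDown (rest.map f) with
    | nil => simp [bDown, hd]
    | cons p ps => simp [bDown, hd]

lemma row_port (m : Nat) (row : List Int) :
    ((PySem.List.slice row none (some (m : Int))).reverse.foldl
        (fun (r : List Int) x =>
          r ++ [if r ≠ [] then max x (PySem.List.pyGetD r (-1) 0) else x]) []).reverse
      = rsuf (row.take m) := by
  rw [b_row_fold]
  simp only [List.reverse_nil, List.reverse_reverse]
  rw [List.foldl_reverse, PySem.List.slice_to_natCast]
  exact b_row_rsuf _

lemma alt_eq_bDown (grid : List (List Int)) :
    build_suffix_max_alt grid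
      = bDown (grid.map (fun row => rsuf (row.take (grid.getD 0 []).length))) := by
  unfold build_suffix_max_alt
  simp only [PySem.List.pyGetD_zero]
  rw [show (fun (acc : List (List Int) × Option (List Int)) (row : List Int) =>
      let r := ((PySem.List.slice row none
          (some (((grid.getD 0 []).length : Nat) : Int))).reverse.foldl
        (fun (r : List Int) x =>
          r ++ [if r ≠ [] then max x (PySem.List.pyGetD r (-1) 0) else x]) []).reverse
      let r := match acc.2 with
        | none => r
        | some p => List.zipWith max r p
      (acc.1 ++ [r], some r))
    = (fun (acc : List (List Int) × Option (List Int)) (row : List Int) =>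
      let r := rsuf (row.take (grid.getD 0 []).length)
      let r := match acc.2 with
        | none => r
        | some p => List.zipWith max r p
      (acc.1 ++ [r], some r)) from by
      funext acc row
      simp only [row_port]]
  rw [b_outer]
  simp

-- == A-side bridging ==

lemma getD_rep_append_self (k : Nat) (z r : List Int) (D : List (List Int)) :
    (List.replicate k z ++ r :: D).getD k [] = r := by
  induction k with
  | zero => rfl
  | succ k ih => simpa using ih

lemma getD_rep_append_succ (k : Nat) (z r : List Int) (D : List (List Int)) :
    (List.replicate k z ++ r :: D).getD (k+1) [] = D.getD 0 [] := by
  induction k with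
  | zero => cases D <;> rfl
  | succ k ih => simpa using ih

lemma set_rep_append (k : Nat) (z v r : List Int) (D : List (List Int)) :
    (List.replicate k z ++ r :: D).set k v = List.replicate k z ++ v :: D := by
  induction k with
  | zero => rfl
  | succ k ih => simpa [List.replicate_succ] using ih

lemma take_getD (l : List Int) (m j : Nat) (h : j < m) :
    (l.take m).getD j 0 = l.getD j 0 := by
  simp [List.getD, h]

lemma getD_default (l : List Int) (j : Nat) (h : l.length ≤ j) : l.getD j 0 = 0 := by
  simp [List.getD, List.getElem?_eq_none_iff.2 h]

lemma tRow_step (m : Nat) (g : List Int) (D : List (List Int)) (hg : m ≤ g.length)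
    (hD : ∀ s ∈ D, s.length = m ∧ Antit s) (jn : Nat) (hj : jn < m) :
    (tRow m g D).getD jn 0 =
      (let best := g.getD jn 0
       let best := if D ≠ [] then max best ((D.getD 0 []).getD jn 0) else best
       let best := if jn + 1 < m then max best ((tRow m g D).getD (jn+1) 0) else best
       if D ≠ [] ∧ jn + 1 < m then max best ((D.getD 0 []).getD (jn+1) 0) else best) := by
  have htake : (g.take m).length = m := by simp [hg]
  cases D with
  | nil =>
    simp only [ne_eq, not_true_eq_false, if_false, false_and]
    by_cases hlt : jn + 1 < m
    · simp only [if_pos hlt, tRow]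
      rw [rsuf_getD _ jn (by rw [htake]; omega), take_getD _ _ _ hj]
    · simp only [if_neg hlt, tRow]
      rw [rsuf_getD_last _ jn (by omega), take_getD _ _ _ hj]
  | cons sr ds =>
    have hs := hD sr List.mem_cons_self
    have hR : (rsuf (g.take m)).length = m := by rw [length_rsuf, htake]
    simp only [ne_eq, reduceCtorEq, not_false_eq_true, if_true, true_and, List.getD_cons_zero,
      tRow]
    rw [getD_zipWith_max _ _ jn (by omega) (by omega)]
    by_cases hlt : jn + 1 < m
    · simp only [if_pos hlt]
      rw [getD_zipWith_max _ _ (jn+1) (by omega) (by omega)]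
      rw [rsuf_getD _ jn (by rw [htake]; omega), take_getD _ _ _ hj]
      have hmono : sr.getD (jn+1) 0 ≤ sr.getD jn 0 := hs.2 jn (by omega)
      simp only [Int.max_def]
      split_ifs <;> omega
    · simp only [if_neg hlt]
      rw [rsuf_getD_last _ jn (by omega), take_getD _ _ _ hj]

lemma D_rows (grid : List (List Int)) (i : Nat)
    (hm : ∀ row ∈ grid, (grid.getD 0 []).length ≤ row.length) :
    ∀ s ∈ bDown ((grid.drop i).map
        (fun row => rsuf (row.take (grid.getD 0 []).length))),
      s.length = (grid.getD 0 []).length ∧ Antit s := by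
  apply bDown_rows
  intro r hr
  rcases List.mem_map.1 hr with ⟨row, hrow, hfr⟩
  have hlen := hm row (List.mem_of_mem_drop hrow)
  subst hfr
  refine ⟨?_, antit_rsuf _⟩
  rw [length_rsuf, List.length_take]
  exact Nat.min_eq_left hlen

lemma inner_fold (grid : List (List Int)) (k : Nat) (hk : k < grid.length)
    (hm : ∀ row ∈ grid, (grid.getD 0 []).length ≤ row.length) (jn : Nat)
    (hj : jn ≤ (grid.getD 0 []).length) (r : List Int)
    (hr : r.length = (grid.getD 0 []).length)
    (hagree : ∀ j' : Nat, jn ≤ j' → r.getD j' 0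
      = (tRow (grid.getD 0 []).length (grid.getD k [])
          (bDown ((grid.drop (k+1)).map
            (fun row => rsuf (row.take (grid.getD 0 []).length))))).getD j' 0) :
    (PySem.List.pyRange ((jn : Int) - 1) (-1) (-1)).foldl (innerStep grid k)
        (List.replicate k (List.replicate (grid.getD 0 []).length 0) ++ r ::
          bDown ((grid.drop (k+1)).map
            (fun row => rsuf (row.take (grid.getD 0 []).length))))
      = List.replicate k (List.replicate (grid.getD 0 []).length 0) ++
          (tRow (grid.getD 0 []).length (grid.getD k [])
            (bDown ((grid.drop (k+1)).map
              (fun row => rsuf (row.take (grid.getD 0 []).length))))) ::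
          bDown ((grid.drop (k+1)).map
            (fun row => rsuf (row.take (grid.getD 0 []).length))) := by
  set m := (grid.getD 0 []).length with hmdef
  set g := grid.getD k [] with hgdef
  set D := bDown ((grid.drop (k+1)).map (fun row => rsuf (row.take m))) with hDdef
  set t := tRow m g D with htdef
  have hg : m ≤ g.length := hm g (by rw [hgdef, List.getD_eq_getElem _ _ hk]; exact List.getElem_mem hk)
  have hDr : ∀ s ∈ D, s.length = m ∧ Antit s := D_rows grid (k+1) hm
  have hDlen : D.length = grid.length - (k+1) := by
    rw [hDdef, length_bDown, List.length_map, List.length_drop]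
  have hT : t.length = m := length_tRow m g D hg (fun s hs => (hDr s hs).1)
  induction jn generalizing r with
  | zero =>
    rw [show ((0:Nat):Int) - 1 = -1 by simp, PySem.List.pyRange_neg_one_eq_nil le_rfl,
      List.foldl_nil]
    have : r = t := by
      apply List.ext_getElem (by rw [hr, hT])
      intro j h1 h2
      have := hagree j (Nat.zero_le _)
      rwa [List.getD_eq_getElem _ _ h1, List.getD_eq_getElem _ _ h2] at this
    rw [this]
  | succ jn ih =>
    rw [show (((jn+1:Nat)):Int) - 1 = (jn:Int) by push_cast; ring,
      PySem.List.pyRange_neg_one_cons (by omega), List.foldl_cons]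
    have hstep : innerStep grid ↑k
        (List.replicate k (List.replicate m 0) ++ r :: D) ↑jn
        = List.replicate k (List.replicate m 0) ++ r.set jn (t.getD jn 0) :: D := by
      unfold innerStep
      simp only [PySem.List.pyGetD_zero, ← hmdef,
        show ((k:Int) + 1) = ((k+1:Nat):Int) by push_cast; ring,
        show ((jn:Int) + 1) = ((jn+1:Nat):Int) by push_cast; ring,
        PySem.List.pyGetD_natCast, PySem.List.pySetD_natCast,
        Nat.cast_lt, ← hgdef,
        getD_rep_append_self, getD_rep_append_succ, set_rep_append]
      congr 2
      have hrjn : r.getD (jn+1) 0 = t.getD (jn+1) 0 := hagree (jn+1) (by omega)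
      rw [hrjn]
      rw [tRow_step m g D hg hDr jn (by omega)]
      have hDne : D ≠ [] ↔ k + 1 < grid.length := by
        rw [← List.length_pos_iff, hDlen]; omega
      simp only [hDne, ← htdef]
    rw [hstep]
    exact ih _ (by omega) (by simp [hr]) (by
      intro j' hj'
      rcases Nat.eq_or_lt_of_le hj' with heq | hlt
      · rw [← heq]
        have hjr : jn < r.length := by rw [hr]; omega
        simp [List.getD, hjr]
      · rw [List.getD, List.getElem?_set_ne (by omega), ← List.getD]
        exact hagree j' (by omega))

lemma bDown_cons (m : Nat) (g : List Int) (R : List (List Int)) :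
    bDown (rsuf (g.take m) :: R) = tRow m g (bDown R) :: bDown R := by
  cases h : bDown R <;> simp [bDown, tRow, h]

lemma outer_fold (grid : List (List Int))
    (hm : ∀ row ∈ grid, (grid.getD 0 []).length ≤ row.length) (k : Nat)
    (hk : k ≤ grid.length) :
    (PySem.List.pyRange ((k : Int) - 1) (-1) (-1)).foldl (outerStep grid)
        (List.replicate k (List.replicate (grid.getD 0 []).length 0) ++
          bDown ((grid.drop k).map
            (fun row => rsuf (row.take (grid.getD 0 []).length))))
      = bDown (grid.map (fun row => rsuf (row.take (grid.getD 0 []).length))) := by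
  induction k with
  | zero =>
    rw [show ((0:Nat):Int) - 1 = -1 by simp, PySem.List.pyRange_neg_one_eq_nil le_rfl,
      List.foldl_nil]
    simp
  | succ k ih =>
    have hk' : k < grid.length := by omega
    have hg : (grid.getD 0 []).length ≤ (grid.getD k []).length := by
      refine hm _ ?_
      rw [List.getD_eq_getElem _ _ hk']
      exact List.getElem_mem hk'
    have hDr := D_rows grid (k+1) hm
    have hT : (tRow (grid.getD 0 []).length (grid.getD k [])
        (bDown ((grid.drop (k+1)).map
          (fun row => rsuf (row.take (grid.getD 0 []).length))))).length
        = (grid.getD 0 []).length :=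
      length_tRow _ _ _ hg (fun s hs => (hDr s hs).1)
    rw [show (((k+1:Nat)):Int) - 1 = (k:Int) by push_cast; ring,
      PySem.List.pyRange_neg_one_cons (by omega), List.foldl_cons]
    rw [show List.replicate (k+1) (List.replicate (grid.getD 0 []).length (0:Int)) ++
        bDown ((grid.drop (k+1)).map (fun row => rsuf (row.take (grid.getD 0 []).length)))
        = List.replicate k (List.replicate (grid.getD 0 []).length (0:Int)) ++
          (List.replicate (grid.getD 0 []).length (0:Int)) ::
          bDown ((grid.drop (k+1)).map (fun row => rsuf (row.take (grid.getD 0 []).length)))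
      from by rw [List.replicate_succ', List.append_assoc]; rfl]
    have houter : outerStep grid
        (List.replicate k (List.replicate (grid.getD 0 []).length (0:Int)) ++
          (List.replicate (grid.getD 0 []).length (0:Int)) ::
          bDown ((grid.drop (k+1)).map (fun row => rsuf (row.take (grid.getD 0 []).length)))) ↑k
        = List.replicate k (List.replicate (grid.getD 0 []).length (0:Int)) ++
          (tRow (grid.getD 0 []).length (grid.getD k [])
            (bDown ((grid.drop (k+1)).map
              (fun row => rsuf (row.take (grid.getD 0 []).length))))) ::
          bDown ((grid.drop (k+1)).map (fun row => rsuf (row.take (grid.getD 0 []).length))) := by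
      unfold outerStep
      simp only [PySem.List.pyGetD_zero]
      refine inner_fold grid k hk' hm (grid.getD 0 []).length le_rfl _ (by simp) ?_
      intro j' hj'
      rw [getD_default (List.replicate (grid.getD 0 []).length 0) j' (by simpa using hj'),
        getD_default _ j' (by rw [hT]; omega)]
    rw [houter]
    rw [show (tRow (grid.getD 0 []).length (grid.getD k [])
          (bDown ((grid.drop (k+1)).map
            (fun row => rsuf (row.take (grid.getD 0 []).length))))) ::
          bDown ((grid.drop (k+1)).map (fun row => rsuf (row.take (grid.getD 0 []).length)))
        = bDown ((grid.drop k).map (fun row => rsuf (row.take (grid.getD 0 []).length)))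
      from by
        rw [show grid.drop k = grid.getD k [] :: grid.drop (k+1) from by
          rw [List.getD_eq_getElem _ _ hk']
          exact List.drop_eq_getElem_cons hk']
        rw [List.map_cons, bDown_cons]]
    exact ih (by omega)

lemma a_eq_bDown (grid : List (List Int))
    (hm : ∀ row ∈ grid, (grid.getD 0 []).length ≤ row.length) :
    build_suffix_max grid
      = bDown (grid.map (fun row => rsuf (row.take (grid.getD 0 []).length))) := by
  have hA : build_suffix_max grid
      = (PySem.List.pyRange ((grid.length : Int) - 1) (-1) (-1)).foldl (outerStep grid)
        (List.replicate grid.length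
          (List.replicate (PySem.List.pyGetD grid 0 []).length 0)) := by
    unfold build_suffix_max outerStep innerStep
    rfl
  rw [hA, PySem.List.pyGetD_zero]
  rw [show List.replicate grid.length (List.replicate (grid.getD 0 []).length (0:Int))
      = List.replicate grid.length (List.replicate (grid.getD 0 []).length (0:Int)) ++
        bDown ((grid.drop grid.length).map
          (fun row => rsuf (row.take (grid.getD 0 []).length)))
    from by simp [bDown]]
  exact outer_fold grid hm grid.length le_rfl

-- ===== VERDICT =====
theorem build_suffix_max_spec : Claim_equal_build_suffix_max := by
  intro grid _ hpre
  obtain ⟨hne, hrows⟩ := hpre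
  unfold Spec_build_suffix_max
  rw [a_eq_bDown, alt_eq_bDown]
  intro row hrow
  have : grid.getD 0 [] = grid.headD [] := by cases grid <;> rfl
  rw [this]; exact hrows row hrow
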